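-- pv_equiv track=rewrite | github.com/pape-medoune/python-TP | projet1.py | trouverUneCombinaison
-- ===== SOURCE A (Python) =====
-- def trouverUneCombinaison(number):
--     tableau = []
--
--     for i in range(1, 7):
--         for j in range(1, 7):
--             for k in range(1, 7):
--                 if i + j + k == number:
--                     combination = tuple(sorted((i, j, k)))
--                     if combination not in tableau:
--                         tableau.append(combination)
--
--     return tableau
-- ===== SOURCE B (Python) =====
-- def trouverUneCombinaison(number):
--     tableau = []
--     for i in range(1, 7):
--         for j in range(i, 7):
--             for k in range(j, 7):
--                 if i + j + k == number:
--                     tableau.append((i, j, k))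
--     return tableau
-- ===== Notes on version B (the rewrite author's own statement) =====
-- stated objective: simpler
-- what changed: B enumerates only non-decreasing triples (j from i, k from j), so each sorted combination is produced exactly once and the sorting and the membership/dedup check disappear.
import Mathlib
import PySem

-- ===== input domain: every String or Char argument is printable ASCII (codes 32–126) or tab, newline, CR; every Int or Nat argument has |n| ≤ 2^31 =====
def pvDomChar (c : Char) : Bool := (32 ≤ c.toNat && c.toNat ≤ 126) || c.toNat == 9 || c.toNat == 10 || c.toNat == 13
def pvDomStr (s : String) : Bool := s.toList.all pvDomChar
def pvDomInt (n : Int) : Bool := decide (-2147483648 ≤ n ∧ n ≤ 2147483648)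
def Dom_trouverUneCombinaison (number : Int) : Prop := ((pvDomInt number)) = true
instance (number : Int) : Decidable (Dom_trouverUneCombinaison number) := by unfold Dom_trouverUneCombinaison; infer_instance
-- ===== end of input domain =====

-- B enumerates only non-decreasing triples (j from i, k from j), so the sort and the
-- membership/dedup check of A disappear; same return value for every int.

-- ===== PORT A =====
-- tuple(sorted((i, j, k))): sort the three values and rebuild the 3-tuple
def pvTuple3 (l : List Int) : Int × Int × Int :=
  match l with
  | [a, b, c] => (a, b, c)
  | _ => (0, 0, 0)

def trouverUneCombinaison (number : Int) : List (Int × Int × Int) :=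
  (PySem.List.pyRange 1 7 1).foldl (fun tab i =>
    (PySem.List.pyRange 1 7 1).foldl (fun tab j =>
      (PySem.List.pyRange 1 7 1).foldl (fun tab k =>
        if i + j + k = number then
          let combination := pvTuple3 (PySem.List.sorted [i, j, k] (fun x => x) false)
          if combination ∈ tab then tab else tab ++ [combination]
        else tab) tab) tab) []

-- ===== PORT B =====
def trouverUneCombinaison_alt (number : Int) : List (Int × Int × Int) :=
  (PySem.List.pyRange 1 7 1).foldl (fun tab i =>
    (PySem.List.pyRange i 7 1).foldl (fun tab j =>
      (PySem.List.pyRange j 7 1).foldl (fun tab k =>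
        if i + j + k = number then tab ++ [(i, j, k)] else tab) tab) tab) []

-- ===== PRECONDITION & SPEC =====
def Spec_trouverUneCombinaison (number : Int) (out : List (Int × Int × Int)) : Prop := out = trouverUneCombinaison_alt number
instance (number : Int) (out : List (Int × Int × Int)) : Decidable (Spec_trouverUneCombinaison number out) := by unfold Spec_trouverUneCombinaison; infer_instance

-- ===== CLAIM (what is proved, stated in full; the proofs are below) =====
def Claim_equal_trouverUneCombinaison : Prop := ∀ (number : Int), Dom_trouverUneCombinaison number → Spec_trouverUneCombinaison number (trouverUneCombinaison number)

-- ===== LEMMAS AND PROOFS =====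

-- a fold whose step fixes the accumulator on every element of the list is the identity
lemma pvFoldlFix {a b : Type} (l : List b) (g : a -> b -> a)
    (h : forall acc x, x ∈ l -> g acc x = acc) (init : a) : l.foldl g init = init := by
  induction l generalizing init with
  | nil => rfl
  | cons y t ih =>
    simp only [List.foldl_cons]
    rw [h init y (by simp), ih (fun acc x hx => h acc x (by simp [hx]))]

-- out-of-range sums: the guard never fires, both programs return []
lemma both_empty (n : Int) (hlo : n < 3 ∨ 18 < n) :
    trouverUneCombinaison n = trouverUneCombinaison_alt n := by
  have hA : trouverUneCombinaison n = [] := by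
    unfold trouverUneCombinaison
    apply pvFoldlFix; intro acc i hi
    apply pvFoldlFix; intro acc j hj
    apply pvFoldlFix; intro acc k hk
    have hi' := PySem.List.mem_pyRange_one.mp hi
    have hj' := PySem.List.mem_pyRange_one.mp hj
    have hk' := PySem.List.mem_pyRange_one.mp hk
    rw [if_neg (by omega)]
  have hB : trouverUneCombinaison_alt n = [] := by
    unfold trouverUneCombinaison_alt
    apply pvFoldlFix; intro acc i hi
    apply pvFoldlFix; intro acc j hj
    apply pvFoldlFix; intro acc k hk
    have hi' := PySem.List.mem_pyRange_one.mp hi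
    have hj' := PySem.List.mem_pyRange_one.mp hj
    have hk' := PySem.List.mem_pyRange_one.mp hk
    rw [if_neg (by omega)]
  rw [hA, hB]

-- ===== VERDICT (by name: the statement is the Claim_ definition above) =====
set_option maxRecDepth 100000 in
theorem trouverUneCombinaison_spec : Claim_equal_trouverUneCombinaison := by
  intro n _
  unfold Spec_trouverUneCombinaison
  by_cases h : 3 ≤ n ∧ n ≤ 18
  · obtain ⟨h1, h2⟩ := h
    interval_cases n <;> decide
  · exact both_empty n (by omega)
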